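-- pv_equiv track=rewrite | github.com/BGSU-RNA/RNA-Structure-utils | rnastructure/align.py | correlate
-- ===== SOURCE A (Python) =====
-- def correlate(reference, sequence):
--     correlations = []
--     for (i, char) in enumerate(reference):
--         seq_char = sequence[i]
--         if char != '-' and seq_char != '-':
--             ref_pos = i - reference[:i].count('-')
--             seq_pos = i - sequence[:i].count('-')
--             correlations.append((ref_pos, seq_pos))
--     return correlations
-- ===== SOURCE B (Python) =====
-- def correlate(reference, sequence):
--     correlations = []
--     ref_dashes = 0
--     seq_dashes = 0
--     for i, char in enumerate(reference):
--         seq_char = sequence[i]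
--         if char != '-' and seq_char != '-':
--             correlations.append((i - ref_dashes, i - seq_dashes))
--         if char == '-':
--             ref_dashes += 1
--         if seq_char == '-':
--             seq_dashes += 1
--     return correlations
-- ===== Notes on version B (the rewrite author's own statement) =====
-- stated objective: faster
-- what changed: Replaced the per-position prefix slice-and-count (reference[:i].count('-')) with two running dash counters maintained in one pass.
import Mathlib
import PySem

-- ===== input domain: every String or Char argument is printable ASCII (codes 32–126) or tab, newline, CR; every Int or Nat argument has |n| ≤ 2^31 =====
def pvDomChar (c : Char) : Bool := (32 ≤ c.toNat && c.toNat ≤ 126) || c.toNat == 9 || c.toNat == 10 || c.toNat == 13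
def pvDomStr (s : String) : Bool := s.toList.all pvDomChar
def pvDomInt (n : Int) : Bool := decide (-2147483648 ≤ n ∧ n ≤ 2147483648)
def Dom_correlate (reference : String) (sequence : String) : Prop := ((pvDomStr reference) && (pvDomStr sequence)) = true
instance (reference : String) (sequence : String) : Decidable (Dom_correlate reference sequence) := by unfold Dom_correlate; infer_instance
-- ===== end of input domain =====

-- B replaces A's quadratic per-position prefix-slice dash counting with two running dash counters in one pass (asymptotically faster).

-- ===== PORT A =====
-- literal port of A: for each (i, char) in enumerate(reference), index sequence[i],
-- and on a match count '-' in the slices reference[:i] and sequence[:i]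
def correlate (reference : String) (sequence : String) : List (Int × Int) :=
  (PySem.List.enumerate reference.toList).foldl
    (fun acc p =>
      match PySem.List.pyGet? sequence.toList p.1 with
      | none => acc      -- Python raises IndexError here; excluded by Pre_correlate
      | some seq_char =>
        if p.2 ≠ '-' ∧ seq_char ≠ '-' then
          acc ++ [(p.1 - (PySem.List.count (PySem.List.slice reference.toList none (some p.1)) '-' : Int),
                   p.1 - (PySem.List.count (PySem.List.slice sequence.toList none (some p.1)) '-' : Int))]
        else acc) []

-- ===== PORT B =====
-- literal port of Source B's single pass: walk both strings together keeping index i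
-- and the running dash counts ref_dashes / seq_dashes
def correlateAltGo : List Char → List Char → Int → Int → Int → List (Int × Int)
  | [], _, _, _, _ => []
  | _ :: _, [], _, _, _ => []      -- Python raises IndexError here; excluded by Pre_correlate
  | ch :: r, sc :: s, i, rd, sd =>
    (if ch ≠ '-' ∧ sc ≠ '-' then [(i - rd, i - sd)] else []) ++
    correlateAltGo r s (i + 1) (if ch = '-' then rd + 1 else rd) (if sc = '-' then sd + 1 else sd)

def correlate_alt (reference : String) (sequence : String) : List (Int × Int) :=
  correlateAltGo reference.toList sequence.toList 0 0 0

-- ===== PRECONDITION & SPEC =====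
-- Pre_ excludes exactly the inputs where sequence is shorter than reference, on which A raises IndexError
def Pre_correlate (reference : String) (sequence : String) : Prop :=
  reference.toList.length ≤ sequence.toList.length
instance (reference : String) (sequence : String) : Decidable (Pre_correlate reference sequence) := by unfold Pre_correlate; infer_instance
def pvWitness_correlate : String × String := ("AC-G", "A-CG")

def Spec_correlate (reference : String) (sequence : String) (out : List (Int × Int)) : Prop := out = correlate_alt reference sequence
instance (reference : String) (sequence : String) (out : List (Int × Int)) : Decidable (Spec_correlate reference sequence out) := by unfold Spec_correlate; infer_instance

-- ===== CLAIM (what is proved, stated in full; the proofs are below) =====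
def Claim_equal_correlate : Prop := ∀ (reference : String) (sequence : String), Dom_correlate reference sequence → Pre_correlate reference sequence → Spec_correlate reference sequence (correlate reference sequence)

-- ===== LEMMAS AND PROOFS =====

-- the main invariant: processing the suffixes at offset i with accumulator acc,
-- A's fold equals acc ++ B's walk started with the prefix dash counts
theorem correlate_go_eq (R S : List Char) (hlen : R.length ≤ S.length) :
    ∀ (i : Nat) (acc : List (Int × Int)), i ≤ R.length →
      (PySem.List.enumerate (R.drop i) (i : Int)).foldl
        (fun acc p =>
          match PySem.List.pyGet? S p.1 with
          | none => acc
          | some seq_char =>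
            if p.2 ≠ '-' ∧ seq_char ≠ '-' then
              acc ++ [(p.1 - (PySem.List.count (PySem.List.slice R none (some p.1)) '-' : Int),
                       p.1 - (PySem.List.count (PySem.List.slice S none (some p.1)) '-' : Int))]
            else acc) acc
      = acc ++ correlateAltGo (R.drop i) (S.drop i) (i : Int)
          ((R.take i).count '-' : Int) ((S.take i).count '-' : Int) := by
  intro i
  induction h : R.length - i generalizing i with
  | zero =>
    intro acc hi
    have hiR : i = R.length := by omega
    subst hiR
    simp [List.drop_length, correlateAltGo]
  | succ n ih =>
    intro acc hi
    have hiR : i < R.length := by omega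
    have hiS : i < S.length := by omega
    have hR : R.drop i = R[i] :: R.drop (i + 1) := List.drop_eq_getElem_cons hiR
    have hS : S.drop i = S[i] :: S.drop (i + 1) := List.drop_eq_getElem_cons hiS
    have hget : PySem.List.pyGet? S (i : Int) = some S[i] :=
      PySem.List.pyGet?_ofNat S i hiS
    have hsliceR : PySem.List.slice R none (some (i : Int)) = R.take i :=
      PySem.List.slice_to_natCast R i
    have hsliceS : PySem.List.slice S none (some (i : Int)) = S.take i :=
      PySem.List.slice_to_natCast S i
    have hcast : (i : Int) + 1 = ((i + 1 : Nat) : Int) := by push_cast; ring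
    have hstep := ih (i + 1) (by omega)
    have htakeR : (R.take (i + 1)).count '-' = (R.take i).count '-' + (if R[i] = '-' then 1 else 0) := by
      rw [List.take_add_one, List.getElem?_eq_getElem hiR, Option.toList_some, List.count_append]
      by_cases h : R[i] = '-' <;> simp [h]
    have htakeS : (S.take (i + 1)).count '-' = (S.take i).count '-' + (if S[i] = '-' then 1 else 0) := by
      rw [List.take_add_one, List.getElem?_eq_getElem hiS, Option.toList_some, List.count_append]
      by_cases h : S[i] = '-' <;> simp [h]
    have hcastR : ((((R.take i).count '-' + (if R[i] = '-' then 1 else 0) : Nat)) : Int)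
        = (if R[i] = '-' then ((R.take i).count '-' : Int) + 1 else ((R.take i).count '-' : Int)) := by
      split_ifs <;> push_cast <;> ring
    have hcastS : ((((S.take i).count '-' + (if S[i] = '-' then 1 else 0) : Nat)) : Int)
        = (if S[i] = '-' then ((S.take i).count '-' : Int) + 1 else ((S.take i).count '-' : Int)) := by
      split_ifs <;> push_cast <;> ring
    rw [hR, PySem.List.enumerate_cons, List.foldl_cons]
    simp only [hget, hsliceR, hsliceS, hcast]
    rw [hstep _ (by omega), htakeR, htakeS, hcastR, hcastS, hS, correlateAltGo, ← hcast]
    split_ifs with hcond <;> simp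

-- ===== VERDICT (by name: the statement is the Claim_ definition above) =====
theorem correlate_spec : Claim_equal_correlate := by
  intro reference sequence _ hpre
  unfold Spec_correlate correlate correlate_alt
  have := correlate_go_eq reference.toList sequence.toList hpre 0 [] (by omega)
  simpa using this
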